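-- pv_equiv track=rewrite | github.com/ldunekac/advent_of_code | src/year_2024/day12/day12.py | get_area_sides
-- ===== SOURCE A (Python) =====
-- def get_area_sides(section):
--     area = len(section)
--     perimeter = area * 4
--
--     edges = []
--
--     mini = None
--     maxi = None
--     minj = None
--     maxj = None
--     for val in section:
--         i, j = val
--         if mini is None:
--             mini = i
--         else:
--             mini = min(mini, i)
--         if maxi is None:
--             maxi = i
--         else:
--             maxi = max(maxi, i)
--
--         if minj is None:
--             minj = j
--         else:
--             minj = min(minj, j)
--         if maxj is None:
--             maxj = j
--         else:
--             maxj = max(maxj, j)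
--
--         if not (i - 1, j) in section:
--             edges.append((i, j, 0))
--         if not (i + 1, j) in section:
--             edges.append((i, j, 1))
--         if not (i , j - 1) in section:
--             edges.append((i, j, 2))
--         if not (i, j + 1) in section:
--             edges.append((i, j, 3))
--
--     num_edges = 0
--     for i in range(mini, maxi + 1):
--         row = [(x, y, val) for x, y, val in edges if x == i and val == 0]
--         in_group = False
--         for j in range(minj, maxj + 1):
--             if not in_group and (i, j, 0) in row:
--                 in_group = True
--             if in_group and (i, j, 0) not in row:
--                 in_group = False
--                 num_edges += 1
--         if in_group:
--             num_edges += 1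
--
--     for i in range(mini, maxi + 1):
--         row = [(x, y, val) for x, y, val in edges if x == i and val == 1]
--
--         in_group = False
--         for j in range(minj, maxj + 1):
--             if not in_group and (i, j, 1) in row:
--                 in_group = True
--             if in_group and (i, j, 1) not in row:
--                 in_group = False
--                 num_edges += 1
--         if in_group:
--             num_edges += 1
--
--     for j in range(minj, maxj + 1):
--         col = [(x, y, val) for x, y, val in edges if y == j and val == 2]
--
--         in_group = False
--         for i in range(mini, maxi + 1):
--             if not in_group and (i, j, 2) in col:
--                 in_group = True
--             if in_group and (i, j, 2) not in col:
--                 in_group = False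
--                 num_edges += 1
--         if in_group:
--             num_edges += 1
--
--     for j in range(minj, maxj + 1):
--         col = [(x, y, val) for x, y, val in edges if y == j and val == 3]
--
--         in_group = False
--         for i in range(mini, maxi + 1):
--             if not in_group and (i, j, 3) in col:
--                 in_group = True
--             if in_group and (i, j, 3) not in col:
--                 in_group = False
--                 num_edges += 1
--         if in_group:
--             num_edges += 1
--
--     return area, num_edges
-- ===== SOURCE B (Python) =====
-- def get_area_sides(section):
--     # One pass over the distinct cells: a boundary edge starts a new side
--     # exactly when the neighbouring cell along the side does not carry the
--     # same kind of boundary edge, so counting side *ends* counts sides.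
--     cells = set(section)
--     sides = 0
--     for (i, j) in cells:
--         if (i - 1, j) not in cells and ((i, j + 1) not in cells or (i - 1, j + 1) in cells):
--             sides += 1
--         if (i + 1, j) not in cells and ((i, j + 1) not in cells or (i + 1, j + 1) in cells):
--             sides += 1
--         if (i, j - 1) not in cells and ((i + 1, j) not in cells or (i + 1, j - 1) in cells):
--             sides += 1
--         if (i, j + 1) not in cells and ((i + 1, j) not in cells or (i + 1, j + 1) in cells):
--             sides += 1
--     return len(section), sides
-- ===== Notes on version B (the rewrite author's own statement) =====
-- stated objective: faster
-- what changed: Replaces A's bounding-box row/column scans with in_group toggles (and its per-row filters of the edge list) by a single pass over the distinct cells with a hash set, counting each boundary edge that ends a contiguous side.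
import Mathlib
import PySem

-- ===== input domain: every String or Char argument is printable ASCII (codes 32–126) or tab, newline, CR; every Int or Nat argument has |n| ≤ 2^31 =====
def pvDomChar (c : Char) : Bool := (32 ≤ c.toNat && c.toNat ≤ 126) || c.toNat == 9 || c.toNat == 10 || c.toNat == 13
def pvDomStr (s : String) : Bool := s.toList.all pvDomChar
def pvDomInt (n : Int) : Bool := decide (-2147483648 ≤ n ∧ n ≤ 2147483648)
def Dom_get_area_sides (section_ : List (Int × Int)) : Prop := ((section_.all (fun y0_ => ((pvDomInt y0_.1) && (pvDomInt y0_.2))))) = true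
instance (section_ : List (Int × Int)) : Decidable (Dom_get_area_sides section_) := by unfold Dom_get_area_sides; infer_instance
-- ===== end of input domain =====

-- B replaces A's bounding-box row/column scans over the edge list by one pass over the distinct
-- cells counting side-ending boundary edges with set lookups (measured faster, asymptotic change).
-- A raises TypeError on the empty list (min/max stay None); Pre_ excludes exactly that input (B returns (0, 0) there).

-- ===== PORT A =====
-- A's first loop body: update the four running Option-min/max and append boundary edges.
def stepA (S : List (Int × Int))
    (st : Option Int × Option Int × Option Int × Option Int × List (Int × Int × Int))
    (val : Int × Int) :
    Option Int × Option Int × Option Int × Option Int × List (Int × Int × Int) :=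
  let i := val.1
  let j := val.2
  let mini := match st.1 with | none => some i | some m => some (min m i)
  let maxi := match st.2.1 with | none => some i | some m => some (max m i)
  let minj := match st.2.2.1 with | none => some j | some m => some (min m j)
  let maxj := match st.2.2.2.1 with | none => some j | some m => some (max m j)
  let edges := st.2.2.2.2
  let edges := if ¬((i - 1, j) ∈ S) then edges ++ [(i, j, (0:Int))] else edges
  let edges := if ¬((i + 1, j) ∈ S) then edges ++ [(i, j, (1:Int))] else edges
  let edges := if ¬((i, j - 1) ∈ S) then edges ++ [(i, j, (2:Int))] else edges
  let edges := if ¬((i, j + 1) ∈ S) then edges ++ [(i, j, (3:Int))] else edges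
  (mini, maxi, minj, maxj, edges)

-- A's inner scan-loop body: the two sequential 'if's on in_group.
def stepScan (S : Int → Bool) (p : Bool × Int) (j : Int) : Bool × Int :=
  let in_group := if !p.1 && S j then true else p.1
  if in_group && !S j then (false, p.2 + 1) else (in_group, p.2)

def get_area_sides (section_ : List (Int × Int)) : Int × Int :=
  let area : Int := (section_.length : Int)
  let _perimeter : Int := area * 4
  let st := section_.foldl (stepA section_) (none, none, none, none, [])
  -- Python raises TypeError below when section is empty (mini is None); Pre_ excludes that input.
  let mini := st.1.getD 0
  let maxi := st.2.1.getD 0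
  let minj := st.2.2.1.getD 0
  let maxj := st.2.2.2.1.getD 0
  let edges := st.2.2.2.2
  let num_edges : Int := 0
  let num_edges := (PySem.List.pyRange mini (maxi + 1) 1).foldl (fun num i =>
    let row := edges.filter (fun e => e.1 == i && e.2.2 == (0:Int))
    let r := (PySem.List.pyRange minj (maxj + 1) 1).foldl
      (stepScan (fun j => decide ((i, j, (0:Int)) ∈ row))) (false, num)
    if r.1 then r.2 + 1 else r.2) num_edges
  let num_edges := (PySem.List.pyRange mini (maxi + 1) 1).foldl (fun num i =>
    let row := edges.filter (fun e => e.1 == i && e.2.2 == (1:Int))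
    let r := (PySem.List.pyRange minj (maxj + 1) 1).foldl
      (stepScan (fun j => decide ((i, j, (1:Int)) ∈ row))) (false, num)
    if r.1 then r.2 + 1 else r.2) num_edges
  let num_edges := (PySem.List.pyRange minj (maxj + 1) 1).foldl (fun num j =>
    let col := edges.filter (fun e => e.2.1 == j && e.2.2 == (2:Int))
    let r := (PySem.List.pyRange mini (maxi + 1) 1).foldl
      (stepScan (fun i => decide ((i, j, (2:Int)) ∈ col))) (false, num)
    if r.1 then r.2 + 1 else r.2) num_edges
  let num_edges := (PySem.List.pyRange minj (maxj + 1) 1).foldl (fun num j =>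
    let col := edges.filter (fun e => e.2.1 == j && e.2.2 == (3:Int))
    let r := (PySem.List.pyRange mini (maxi + 1) 1).foldl
      (stepScan (fun i => decide ((i, j, (3:Int)) ∈ col))) (false, num)
    if r.1 then r.2 + 1 else r.2) num_edges
  (area, num_edges)

-- ===== PORT B =====
-- B's loop body: count, for each distinct cell, the boundary edges that end a side.
def bCount (cells : List (Int × Int)) (sides : Int) (c : Int × Int) : Int :=
  let i := c.1
  let j := c.2
  let sides := if ¬((i - 1, j) ∈ cells) ∧ (¬((i, j + 1) ∈ cells) ∨ (i - 1, j + 1) ∈ cells) then sides + 1 else sides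
  let sides := if ¬((i + 1, j) ∈ cells) ∧ (¬((i, j + 1) ∈ cells) ∨ (i + 1, j + 1) ∈ cells) then sides + 1 else sides
  let sides := if ¬((i, j - 1) ∈ cells) ∧ (¬((i + 1, j) ∈ cells) ∨ (i + 1, j - 1) ∈ cells) then sides + 1 else sides
  let sides := if ¬((i, j + 1) ∈ cells) ∧ (¬((i + 1, j) ∈ cells) ∨ (i + 1, j + 1) ∈ cells) then sides + 1 else sides
  sides

def get_area_sides_alt (section_ : List (Int × Int)) : Int × Int :=
  let cells := PySem.Set.ofList section_
  let sides := cells.foldl (bCount cells) 0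
  ((section_.length : Int), sides)

-- ===== PRECONDITION & SPEC =====
-- Pre_ excludes exactly the empty list, on which Python's A raises TypeError (range(None, ...)).
def Pre_get_area_sides (section_ : List (Int × Int)) : Prop := section_ ≠ []
instance (section_ : List (Int × Int)) : Decidable (Pre_get_area_sides section_) := by unfold Pre_get_area_sides; infer_instance
def pvWitness_get_area_sides : (List (Int × Int)) := [(0, 0), (0, 1)]

def Spec_get_area_sides (section_ : List (Int × Int)) (out : Int × Int) : Prop := out = get_area_sides_alt section_
instance (section_ : List (Int × Int)) (out : Int × Int) : Decidable (Spec_get_area_sides section_ out) := by unfold Spec_get_area_sides; infer_instance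

-- ===== CLAIM (what is proved, stated in full; the proofs are below) =====
def Claim_equal_get_area_sides : Prop := ∀ (section_ : List (Int × Int)), Dom_get_area_sides section_ → Pre_get_area_sides section_ → Spec_get_area_sides section_ (get_area_sides section_)

-- ===== LEMMAS AND PROOFS =====

-- the per-cell boundary edges A's first loop appends
def edgeCells (S : List (Int × Int)) (c : Int × Int) : List (Int × Int × Int) :=
  (if ¬((c.1 - 1, c.2) ∈ S) then [(c.1, c.2, (0:Int))] else []) ++
  (if ¬((c.1 + 1, c.2) ∈ S) then [(c.1, c.2, (1:Int))] else []) ++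
  (if ¬((c.1, c.2 - 1) ∈ S) then [(c.1, c.2, (2:Int))] else []) ++
  (if ¬((c.1, c.2 + 1) ∈ S) then [(c.1, c.2, (3:Int))] else [])

def optMin (f : Int × Int → Int) (o : Option Int) (c : Int × Int) : Option Int :=
  match o with | none => some (f c) | some m => some (min m (f c))
def optMax (f : Int × Int → Int) (o : Option Int) (c : Int × Int) : Option Int :=
  match o with | none => some (f c) | some m => some (max m (f c))

lemma foldA_decomp (S : List (Int × Int)) :
    ∀ (l : List (Int × Int)) (st : Option Int × Option Int × Option Int × Option Int × List (Int × Int × Int)),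
    l.foldl (stepA S) st =
      (l.foldl (optMin (·.1)) st.1, l.foldl (optMax (·.1)) st.2.1,
       l.foldl (optMin (·.2)) st.2.2.1, l.foldl (optMax (·.2)) st.2.2.2.1,
       st.2.2.2.2 ++ l.flatMap (edgeCells S)) := by
  intro l
  induction l with
  | nil => intro st; simp
  | cons c t ih =>
      intro st
      simp only [List.foldl_cons, ih, List.flatMap_cons]
      rcases st with ⟨mi, ma, mj, mx, ed⟩
      simp only [stepA, edgeCells, optMin, optMax, Prod.mk.injEq]
      refine ⟨?_, ?_, ?_, ?_, ?_⟩ <;> first | trivial | (split_ifs <;> simp)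

lemma optMin_some (f : Int × Int → Int) :
    ∀ (l : List (Int × Int)) (m : Int),
    l.foldl (optMin f) (some m) = some (l.foldl (fun a c => min a (f c)) m) := by
  intro l
  induction l with
  | nil => intro m; simp
  | cons c t ih => intro m; simp [optMin, ih]

lemma optMax_some (f : Int × Int → Int) :
    ∀ (l : List (Int × Int)) (m : Int),
    l.foldl (optMax f) (some m) = some (l.foldl (fun a c => max a (f c)) m) := by
  intro l
  induction l with
  | nil => intro m; simp
  | cons c t ih => intro m; simp [optMax, ih]

lemma foldl_min_le (f : Int × Int → Int) :
    ∀ (l : List (Int × Int)) (m : Int),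
    l.foldl (fun a c => min a (f c)) m ≤ m ∧ ∀ c ∈ l, l.foldl (fun a c => min a (f c)) m ≤ f c := by
  intro l
  induction l with
  | nil => simp
  | cons c t ih =>
      intro m
      refine ⟨le_trans (ih (min m (f c))).1 (by simp), ?_⟩
      intro x hx
      rw [List.mem_cons] at hx
      rcases hx with rfl | h
      · exact le_trans (ih _).1 (by simp)
      · exact (ih _).2 _ h

lemma le_foldl_max (f : Int × Int → Int) :
    ∀ (l : List (Int × Int)) (m : Int),
    m ≤ l.foldl (fun a c => max a (f c)) m ∧ ∀ c ∈ l, f c ≤ l.foldl (fun a c => max a (f c)) m := by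
  intro l
  induction l with
  | nil => simp
  | cons c t ih =>
      intro m
      refine ⟨le_trans (by simp) (ih (max m (f c))).1, ?_⟩
      intro x hx
      rw [List.mem_cons] at hx
      rcases hx with rfl | h
      · exact le_trans (by simp) (ih _).1
      · exact (ih _).2 _ h

-- the four boundary-edge predicates
def e0 (S : List (Int × Int)) (i j : Int) : Bool := decide ((i, j) ∈ S) && !decide ((i - 1, j) ∈ S)
def e1 (S : List (Int × Int)) (i j : Int) : Bool := decide ((i, j) ∈ S) && !decide ((i + 1, j) ∈ S)
def e2 (S : List (Int × Int)) (i j : Int) : Bool := decide ((i, j) ∈ S) && !decide ((i, j - 1) ∈ S)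
def e3 (S : List (Int × Int)) (i j : Int) : Bool := decide ((i, j) ∈ S) && !decide ((i, j + 1) ∈ S)

lemma mem_edgeCells (S : List (Int × Int)) (i j d : Int) (c : Int × Int) :
    ((i, j, d) ∈ edgeCells S c) ↔
      (c = (i, j) ∧
        ((d = 0 ∧ ¬((i - 1, j) ∈ S)) ∨ (d = 1 ∧ ¬((i + 1, j) ∈ S)) ∨
         (d = 2 ∧ ¬((i, j - 1) ∈ S)) ∨ (d = 3 ∧ ¬((i, j + 1) ∈ S)))) := by
  rcases c with ⟨x, y⟩
  simp only [edgeCells, List.mem_append]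
  split_ifs <;> simp_all [Prod.ext_iff] <;> aesop

lemma mem_edges (S : List (Int × Int)) (i j d : Int) :
    ((i, j, d) ∈ S.flatMap (edgeCells S)) ↔
      ((d = 0 ∧ e0 S i j) ∨ (d = 1 ∧ e1 S i j) ∨ (d = 2 ∧ e2 S i j) ∨ (d = 3 ∧ e3 S i j)) := by
  simp only [List.mem_flatMap, mem_edgeCells, e0, e1, e2, e3]
  constructor
  · rintro ⟨c, hc, rfl, h⟩
    simp_all
  · rintro (⟨rfl, h⟩ | ⟨rfl, h⟩ | ⟨rfl, h⟩ | ⟨rfl, h⟩) <;>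
      simp only [Bool.and_eq_true, decide_eq_true_eq, Bool.not_eq_true', decide_eq_false_iff_not] at h <;>
      exact ⟨(i, j), h.1, rfl, by tauto⟩

-- scan lemma: A's in_group scan over a range counts the runs of S
def cntT (S : Int → Bool) (a b : Int) : Int :=
  (((PySem.List.pyRange a b 1).countP (fun j => S j && (decide (j + 1 = b) || !S (j + 1))) : Nat) : Int)

lemma cntT_cons (S : Int → Bool) {a b : Int} (h : a < b) :
    cntT S a b = (if S a && (decide (a + 1 = b) || !S (a + 1)) then 1 else 0) + cntT S (a + 1) b := by
  unfold cntT
  rw [PySem.List.pyRange_one_cons h, List.countP_cons]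
  push_cast
  split_ifs <;> omega

lemma scanT (S : Int → Bool) :
    ∀ (k : Nat) (a b : Int), (b - a).toNat = k → ∀ (g : Bool) (n : Int),
    (let r := (PySem.List.pyRange a b 1).foldl (stepScan S) (g, n);
     if r.1 then r.2 + 1 else r.2) =
      n + cntT S a b + (if g && (decide (b ≤ a) || !S a) then 1 else 0) := by
  intro k
  induction k with
  | zero =>
      intro a b hk g n
      have hba : b ≤ a := by omega
      simp only [cntT, PySem.List.pyRange_one_eq_nil hba, List.foldl_nil, List.countP_nil]
      simp [hba]
      cases g <;> simp
  | succ k ih =>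
      intro a b hk g n
      have hab : a < b := by omega
      have hstep : stepScan S (g, n) a = (S a, n + (if g && !S a then 1 else 0)) := by
        cases hg : g <;> cases hs : S a <;> simp [stepScan, hs]
      rw [PySem.List.pyRange_one_cons hab]
      simp only [List.foldl_cons, hstep]
      rw [ih (a + 1) b (by omega) (S a) (n + (if g && !S a then 1 else 0))]
      rw [cntT_cons S hab]
      have h1 : decide (b ≤ a) = false := by simp; omega
      have h2 : decide (b ≤ a + 1) = decide (a + 1 = b) := by
        rcases (decide (a + 1 = b)).eq_false_or_eq_true with h | h <;> simp_all <;> omega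
      rw [h1, h2]
      cases hsa : S a <;> cases hg : g <;> cases hd : decide (a + 1 = b) <;>
        cases hs1 : S (a + 1) <;> simp <;> omega

lemma scan_count (S : Int → Bool) (a b : Int) (hb : S b = false) (n : Int) :
    (let r := (PySem.List.pyRange a b 1).foldl (stepScan S) (false, n);
     if r.1 then r.2 + 1 else r.2) =
      n + (((PySem.List.pyRange a b 1).countP (fun j => S j && !S (j + 1)) : Nat) : Int) := by
  rw [scanT S (b - a).toNat a b rfl false n]
  have hc : (PySem.List.pyRange a b 1).countP (fun j => S j && (decide (j + 1 = b) || !S (j + 1)))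
      = (PySem.List.pyRange a b 1).countP (fun j => S j && !S (j + 1)) := by
    apply List.countP_congr
    intro j hj
    by_cases h : j + 1 = b
    · simp [h, hb]
    · simp [h]
  simp [cntT, hc]

-- counting machinery
lemma sum_countP {α β : Type} (l₁ : List α) (l₂ : List β) (p : α → β → Bool) :
    (l₁.map (fun i => (((l₂.countP (p i)) : Nat) : Int))).sum =
      (((l₁.flatMap (fun i => l₂.map (fun j => (i, j)))).countP (fun z => p z.1 z.2) : Nat) : Int) := by
  induction l₁ with
  | nil => simp
  | cons x t ih =>
      simp only [List.map_cons, List.sum_cons, List.flatMap_cons, List.countP_append, ih,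
        List.countP_map, Function.comp_def]
      have he : l₂.countP (fun y => p x y) = l₂.countP (p x) := rfl
      push_cast
      omega

lemma countP_eq_of_nodup {α : Type} [DecidableEq α] (l₁ l₂ : List α) (p : α → Bool)
    (h₁ : l₁.Nodup) (h₂ : l₂.Nodup) (hm : ∀ a, p a = true → (a ∈ l₁ ∧ a ∈ l₂)) :
    l₁.countP p = l₂.countP p := by
  have hperm : List.Perm (l₁.filter p) (l₂.filter p) := by
    rw [List.perm_ext_iff_of_nodup (h₁.filter p) (h₂.filter p)]
    intro a
    simp only [List.mem_filter]
    constructor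
    · rintro ⟨ha, hp⟩; exact ⟨(hm a hp).2, hp⟩
    · rintro ⟨ha, hp⟩; exact ⟨(hm a hp).1, hp⟩
  rw [List.countP_eq_length_filter, List.countP_eq_length_filter, hperm.length_eq]

lemma nodup_grid (a b c d : Int) :
    ((PySem.List.pyRange a b 1).flatMap (fun i => (PySem.List.pyRange c d 1).map (fun j => (i, j)))).Nodup :=
  List.Nodup.product (PySem.List.nodup_pyRange_one a b) (PySem.List.nodup_pyRange_one c d)

lemma mem_grid (a b c d : Int) (z : Int × Int) :
    z ∈ (PySem.List.pyRange a b 1).flatMap (fun o => (PySem.List.pyRange c d 1).map (fun v => (o, v))) ↔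
      (a ≤ z.1 ∧ z.1 < b ∧ c ≤ z.2 ∧ z.2 < d) := by
  rcases z with ⟨x, y⟩
  simp [List.mem_flatMap, PySem.List.mem_pyRange_one, Prod.ext_iff]
  aesop

-- A's outer loop over one direction, fully counted
lemma loopA (edges : List (Int × Int × Int)) (E : Int → Int → Bool)
    (filt : Int → Int × Int × Int → Bool) (mk : Int → Int → Int × Int × Int)
    (a b c d : Int)
    (hmem : ∀ o v, decide (mk o v ∈ edges.filter (filt o)) = E o v)
    (hbound : ∀ o, E o d = false) :
    ∀ n : Int,
    (PySem.List.pyRange a b 1).foldl (fun num o =>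
        let row := edges.filter (filt o)
        let r := (PySem.List.pyRange c d 1).foldl (stepScan (fun v => decide (mk o v ∈ row))) (false, num)
        if r.1 then r.2 + 1 else r.2) n
      = n + ((((PySem.List.pyRange a b 1).flatMap (fun o => (PySem.List.pyRange c d 1).map (fun v => (o, v)))).countP
          (fun z => E z.1 z.2 && !E z.1 (z.2 + 1)) : Nat) : Int) := by
  intro n
  have hbody : ∀ (num o : Int),
      (let row := edges.filter (filt o)
       let r := (PySem.List.pyRange c d 1).foldl (stepScan (fun v => decide (mk o v ∈ row))) (false, num)
       if r.1 then r.2 + 1 else r.2)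
      = num + (((PySem.List.pyRange c d 1).countP (fun v => E o v && !E o (v + 1)) : Nat) : Int) := by
    intro num o
    have hfun : (fun v => decide (mk o v ∈ edges.filter (filt o))) = E o := by
      funext v; exact hmem o v
    simp only [hfun]
    exact scan_count (E o) c d (hbound o) num
  rw [PySem.List.foldl_congr_mem (PySem.List.pyRange a b 1)
    (fun num o =>
        let row := edges.filter (filt o)
        let r := (PySem.List.pyRange c d 1).foldl (stepScan (fun v => decide (mk o v ∈ row))) (false, num)
        if r.1 then r.2 + 1 else r.2)
    (fun num o => num + (((PySem.List.pyRange c d 1).countP (fun v => E o v && !E o (v + 1)) : Nat) : Int))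
    n (fun acc x _ => hbody acc x)]
  rw [PySem.List.foldl_add, sum_countP]

-- B-side: the four per-cell conditions, and B's fold as four counts
def Q0 (cells : List (Int × Int)) (c : Int × Int) : Bool :=
  decide (¬((c.1 - 1, c.2) ∈ cells) ∧ (¬((c.1, c.2 + 1) ∈ cells) ∨ (c.1 - 1, c.2 + 1) ∈ cells))
def Q1 (cells : List (Int × Int)) (c : Int × Int) : Bool :=
  decide (¬((c.1 + 1, c.2) ∈ cells) ∧ (¬((c.1, c.2 + 1) ∈ cells) ∨ (c.1 + 1, c.2 + 1) ∈ cells))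
def Q2 (cells : List (Int × Int)) (c : Int × Int) : Bool :=
  decide (¬((c.1, c.2 - 1) ∈ cells) ∧ (¬((c.1 + 1, c.2) ∈ cells) ∨ (c.1 + 1, c.2 - 1) ∈ cells))
def Q3 (cells : List (Int × Int)) (c : Int × Int) : Bool :=
  decide (¬((c.1, c.2 + 1) ∈ cells) ∧ (¬((c.1 + 1, c.2) ∈ cells) ∨ (c.1 + 1, c.2 + 1) ∈ cells))

def q0 (S : List (Int × Int)) (c : Int × Int) : Bool := e0 S c.1 c.2 && !e0 S c.1 (c.2 + 1)
def q1 (S : List (Int × Int)) (c : Int × Int) : Bool := e1 S c.1 c.2 && !e1 S c.1 (c.2 + 1)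
def q2 (S : List (Int × Int)) (c : Int × Int) : Bool := e2 S c.1 c.2 && !e2 S (c.1 + 1) c.2
def q3 (S : List (Int × Int)) (c : Int × Int) : Bool := e3 S c.1 c.2 && !e3 S (c.1 + 1) c.2

lemma foldl_bCount (cells : List (Int × Int)) :
    ∀ (l : List (Int × Int)) (s : Int),
    l.foldl (bCount cells) s = s + ((l.countP (Q0 cells) : Nat) : Int) + ((l.countP (Q1 cells) : Nat) : Int)
      + ((l.countP (Q2 cells) : Nat) : Int) + ((l.countP (Q3 cells) : Nat) : Int) := by
  intro l
  induction l with
  | nil => intro s; simp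
  | cons c t ih =>
      intro s
      simp only [List.foldl_cons, ih, List.countP_cons]
      push_cast
      simp only [bCount, Q0, Q1, Q2, Q3, decide_eq_true_eq]
      split_ifs <;> omega

-- on members of the cell set, B's conditions coincide with the run-end predicates
lemma Q_eq_q (S : List (Int × Int)) (c : Int × Int) (hc : c ∈ S) :
    Q0 (PySem.Set.ofList S) c = q0 S c ∧ Q1 (PySem.Set.ofList S) c = q1 S c ∧
    Q2 (PySem.Set.ofList S) c = q2 S c ∧ Q3 (PySem.Set.ofList S) c = q3 S c := by
  have hcS : (c.1, c.2) ∈ S := by rwa [Prod.mk.eta]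
  refine ⟨?_, ?_, ?_, ?_⟩ <;>
    simp [Q0, Q1, Q2, Q3, q0, q1, q2, q3, e0, e1, e2, e3, PySem.Set.mem_ofList, hcS]

set_option maxHeartbeats 2000000 in
lemma main_eq (S : List (Int × Int)) (hne : S ≠ []) :
    get_area_sides S = get_area_sides_alt S := by
  cases S with
  | nil => exact absurd rfl hne
  | cons c0 t =>
    have hmin1 : (c0 :: t).foldl (optMin (·.1)) none = some (t.foldl (fun a c => min a c.1) c0.1) := by
      simp [optMin_some, optMin]
    have hmax1 : (c0 :: t).foldl (optMax (·.1)) none = some (t.foldl (fun a c => max a c.1) c0.1) := by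
      simp [optMax_some, optMax]
    have hmin2 : (c0 :: t).foldl (optMin (·.2)) none = some (t.foldl (fun a c => min a c.2) c0.2) := by
      simp [optMin_some, optMin]
    have hmax2 : (c0 :: t).foldl (optMax (·.2)) none = some (t.foldl (fun a c => max a c.2) c0.2) := by
      simp [optMax_some, optMax]
    simp only [get_area_sides, get_area_sides_alt, foldA_decomp, hmin1, hmax1, hmin2, hmax2,
      Option.getD_some, List.nil_append]
    set L := c0 :: t with hL
    set mI := List.foldl (fun a c => min a c.1) c0.1 t with hmI
    set mA := List.foldl (fun a c => max a c.1) c0.1 t with hmA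
    set mJ := List.foldl (fun a c => min a c.2) c0.2 t with hmJ
    set mX := List.foldl (fun a c => max a c.2) c0.2 t with hmX
    set ed := L.flatMap (edgeCells L) with hed
    set cells := PySem.Set.ofList L with hcells
    have hbI : ∀ c ∈ L, mI ≤ c.1 ∧ c.1 ≤ mA := by
      rw [hL, hmI, hmA]
      intro c hc
      rw [List.mem_cons] at hc
      rcases hc with rfl | hc
      · exact ⟨(foldl_min_le (·.1) t c.1).1, (le_foldl_max (·.1) t c.1).1⟩
      · exact ⟨(foldl_min_le (·.1) t c0.1).2 c hc, (le_foldl_max (·.1) t c0.1).2 c hc⟩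
    have hbJ : ∀ c ∈ L, mJ ≤ c.2 ∧ c.2 ≤ mX := by
      rw [hL, hmJ, hmX]
      intro c hc
      rw [List.mem_cons] at hc
      rcases hc with rfl | hc
      · exact ⟨(foldl_min_le (·.2) t c.2).1, (le_foldl_max (·.2) t c.2).1⟩
      · exact ⟨(foldl_min_le (·.2) t c0.2).2 c hc, (le_foldl_max (·.2) t c0.2).2 c hc⟩
    have hedge : ∀ i j d : Int, ((i, j, d) ∈ ed) ↔
        ((d = 0 ∧ e0 L i j) ∨ (d = 1 ∧ e1 L i j) ∨ (d = 2 ∧ e2 L i j) ∨ (d = 3 ∧ e3 L i j)) := by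
      rw [hed]; exact mem_edges L
    have hm0 : ∀ o v : Int, decide ((o, v, (0:Int)) ∈ ed.filter (fun e => e.1 == o && e.2.2 == (0:Int))) = e0 L o v := by
      intro o v
      have hiff : ((o, v, (0:Int)) ∈ ed.filter (fun e => e.1 == o && e.2.2 == (0:Int))) ↔ e0 L o v = true := by
        rw [List.mem_filter, hedge]
        norm_num
      cases h : e0 L o v <;> simp [hiff, h]
    have hm1 : ∀ o v : Int, decide ((o, v, (1:Int)) ∈ ed.filter (fun e => e.1 == o && e.2.2 == (1:Int))) = e1 L o v := by
      intro o v
      have hiff : ((o, v, (1:Int)) ∈ ed.filter (fun e => e.1 == o && e.2.2 == (1:Int))) ↔ e1 L o v = true := by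
        rw [List.mem_filter, hedge]
        norm_num
      cases h : e1 L o v <;> simp [hiff, h]
    have hm2 : ∀ o v : Int, decide ((v, o, (2:Int)) ∈ ed.filter (fun e => e.2.1 == o && e.2.2 == (2:Int))) = e2 L v o := by
      intro o v
      have hiff : ((v, o, (2:Int)) ∈ ed.filter (fun e => e.2.1 == o && e.2.2 == (2:Int))) ↔ e2 L v o = true := by
        rw [List.mem_filter, hedge]
        norm_num
      cases h : e2 L v o <;> simp [hiff, h]
    have hm3 : ∀ o v : Int, decide ((v, o, (3:Int)) ∈ ed.filter (fun e => e.2.1 == o && e.2.2 == (3:Int))) = e3 L v o := by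
      intro o v
      have hiff : ((v, o, (3:Int)) ∈ ed.filter (fun e => e.2.1 == o && e.2.2 == (3:Int))) ↔ e3 L v o = true := by
        rw [List.mem_filter, hedge]
        norm_num
      cases h : e3 L v o <;> simp [hiff, h]
    have hnotJ : ∀ o : Int, (o, mX + 1) ∉ L := by
      intro o h
      have := (hbJ _ h).2
      simp at this
    have hnotI : ∀ o : Int, (mA + 1, o) ∉ L := by
      intro o h
      have := (hbI _ h).2
      simp at this
    have hb0 : ∀ o : Int, e0 L o (mX + 1) = false := by
      intro o; simp [e0, hnotJ o]
    have hb1 : ∀ o : Int, e1 L o (mX + 1) = false := by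
      intro o; simp [e1, hnotJ o]
    have hb2 : ∀ o : Int, e2 L (mA + 1) o = false := by
      intro o; simp [e2, hnotI o]
    have hb3 : ∀ o : Int, e3 L (mA + 1) o = false := by
      intro o; simp [e3, hnotI o]
    have l0 := loopA ed (e0 L) (fun o e => e.1 == o && e.2.2 == (0:Int)) (fun o v => (o, v, (0:Int)))
      mI (mA + 1) mJ (mX + 1) hm0 hb0
    have l1 := loopA ed (e1 L) (fun o e => e.1 == o && e.2.2 == (1:Int)) (fun o v => (o, v, (1:Int)))
      mI (mA + 1) mJ (mX + 1) hm1 hb1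
    have l2 := loopA ed (fun o v => e2 L v o) (fun o e => e.2.1 == o && e.2.2 == (2:Int)) (fun o v => (v, o, (2:Int)))
      mJ (mX + 1) mI (mA + 1) hm2 hb2
    have l3 := loopA ed (fun o v => e3 L v o) (fun o e => e.2.1 == o && e.2.2 == (3:Int)) (fun o v => (v, o, (3:Int)))
      mJ (mX + 1) mI (mA + 1) hm3 hb3
    simp only [l0, l1, l2, l3, foldl_bCount cells cells 0]
    have hcmem : ∀ c ∈ cells, c ∈ L := by
      intro c hc; rwa [hcells, PySem.Set.mem_ofList] at hc
    have hnodC : List.Nodup cells := by rw [hcells]; exact PySem.Set.nodup_ofList L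
    have hc0 : List.countP (fun z => e0 L z.1 z.2 && !e0 L z.1 (z.2 + 1))
        (List.flatMap (fun o => List.map (fun v => (o, v)) (PySem.List.pyRange mJ (mX + 1) 1))
          (PySem.List.pyRange mI (mA + 1) 1)) = List.countP (Q0 cells) cells := by
      have h1 : List.countP (q0 L)
          (List.flatMap (fun o => List.map (fun v => (o, v)) (PySem.List.pyRange mJ (mX + 1) 1))
            (PySem.List.pyRange mI (mA + 1) 1)) = List.countP (q0 L) cells := by
        apply countP_eq_of_nodup _ _ _ (nodup_grid _ _ _ _) hnodC
        intro z hz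
        have hzL : (z.1, z.2) ∈ L := by revert hz; simp [q0, e0]; tauto
        rw [Prod.mk.eta] at hzL
        constructor
        · rw [mem_grid]
          exact ⟨(hbI z hzL).1, by have := (hbI z hzL).2; omega,
                 (hbJ z hzL).1, by have := (hbJ z hzL).2; omega⟩
        · rw [hcells, PySem.Set.mem_ofList]; exact hzL
      have h2 : List.countP (Q0 cells) cells = List.countP (q0 L) cells := by
        apply List.countP_congr
        intro c hc
        rw [(Q_eq_q L c (hcmem c hc)).1]
      exact h1.trans h2.symm
    have hc1 : List.countP (fun z => e1 L z.1 z.2 && !e1 L z.1 (z.2 + 1))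
        (List.flatMap (fun o => List.map (fun v => (o, v)) (PySem.List.pyRange mJ (mX + 1) 1))
          (PySem.List.pyRange mI (mA + 1) 1)) = List.countP (Q1 cells) cells := by
      have h1 : List.countP (q1 L)
          (List.flatMap (fun o => List.map (fun v => (o, v)) (PySem.List.pyRange mJ (mX + 1) 1))
            (PySem.List.pyRange mI (mA + 1) 1)) = List.countP (q1 L) cells := by
        apply countP_eq_of_nodup _ _ _ (nodup_grid _ _ _ _) hnodC
        intro z hz
        have hzL : (z.1, z.2) ∈ L := by revert hz; simp [q1, e1]; tauto
        rw [Prod.mk.eta] at hzL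
        constructor
        · rw [mem_grid]
          exact ⟨(hbI z hzL).1, by have := (hbI z hzL).2; omega,
                 (hbJ z hzL).1, by have := (hbJ z hzL).2; omega⟩
        · rw [hcells, PySem.Set.mem_ofList]; exact hzL
      have h2 : List.countP (Q1 cells) cells = List.countP (q1 L) cells := by
        apply List.countP_congr
        intro c hc
        rw [(Q_eq_q L c (hcmem c hc)).2.1]
      exact h1.trans h2.symm
    have hc2 : List.countP (fun z => e2 L z.2 z.1 && !e2 L (z.2 + 1) z.1)
        (List.flatMap (fun o => List.map (fun v => (o, v)) (PySem.List.pyRange mI (mA + 1) 1))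
          (PySem.List.pyRange mJ (mX + 1) 1)) = List.countP (Q2 cells) cells := by
      have h1 : List.countP (fun z => q2 L (z.2, z.1))
          (List.flatMap (fun o => List.map (fun v => (o, v)) (PySem.List.pyRange mI (mA + 1) 1))
            (PySem.List.pyRange mJ (mX + 1) 1)) = List.countP (fun z => q2 L (z.2, z.1)) (cells.map Prod.swap) := by
        apply countP_eq_of_nodup _ _ _ (nodup_grid _ _ _ _) (hnodC.map Prod.swap_injective)
        intro z hz
        have hzL : (z.2, z.1) ∈ L := by revert hz; simp [q2, e2]; tauto
        constructor
        · rw [mem_grid]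
          exact ⟨(hbJ _ hzL).1, by have := (hbJ _ hzL).2; omega,
                 (hbI _ hzL).1, by have := (hbI _ hzL).2; omega⟩
        · rw [List.mem_map]
          exact ⟨(z.2, z.1), by rw [hcells, PySem.Set.mem_ofList]; exact hzL, by simp [Prod.swap]⟩
      have h2 : List.countP (fun z => q2 L (z.2, z.1)) (cells.map Prod.swap) = List.countP (q2 L) cells := by
        rw [List.countP_map]; rfl
      have h3 : List.countP (Q2 cells) cells = List.countP (q2 L) cells := by
        apply List.countP_congr
        intro c hc
        rw [(Q_eq_q L c (hcmem c hc)).2.2.1]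
      exact (h1.trans h2).trans h3.symm
    have hc3 : List.countP (fun z => e3 L z.2 z.1 && !e3 L (z.2 + 1) z.1)
        (List.flatMap (fun o => List.map (fun v => (o, v)) (PySem.List.pyRange mI (mA + 1) 1))
          (PySem.List.pyRange mJ (mX + 1) 1)) = List.countP (Q3 cells) cells := by
      have h1 : List.countP (fun z => q3 L (z.2, z.1))
          (List.flatMap (fun o => List.map (fun v => (o, v)) (PySem.List.pyRange mI (mA + 1) 1))
            (PySem.List.pyRange mJ (mX + 1) 1)) = List.countP (fun z => q3 L (z.2, z.1)) (cells.map Prod.swap) := by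
        apply countP_eq_of_nodup _ _ _ (nodup_grid _ _ _ _) (hnodC.map Prod.swap_injective)
        intro z hz
        have hzL : (z.2, z.1) ∈ L := by revert hz; simp [q3, e3]; tauto
        constructor
        · rw [mem_grid]
          exact ⟨(hbJ _ hzL).1, by have := (hbJ _ hzL).2; omega,
                 (hbI _ hzL).1, by have := (hbI _ hzL).2; omega⟩
        · rw [List.mem_map]
          exact ⟨(z.2, z.1), by rw [hcells, PySem.Set.mem_ofList]; exact hzL, by simp [Prod.swap]⟩
      have h2 : List.countP (fun z => q3 L (z.2, z.1)) (cells.map Prod.swap) = List.countP (q3 L) cells := by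
        rw [List.countP_map]; rfl
      have h3 : List.countP (Q3 cells) cells = List.countP (q3 L) cells := by
        apply List.countP_congr
        intro c hc
        rw [(Q_eq_q L c (hcmem c hc)).2.2.2]
      exact (h1.trans h2).trans h3.symm
    rw [hc0, hc1, hc2, hc3]
-- ===== VERDICT (by name: the statement is the Claim_ definition above) =====
theorem get_area_sides_spec : Claim_equal_get_area_sides := by
  intro s _ hpre
  unfold Spec_get_area_sides
  exact main_eq s hpre
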